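-- pv_equiv track=rewrite | github.com/drguggiana/prey_capture | functions_data_handling.py | combinatorial_query
-- ===== SOURCE A (Python) =====
-- import itertools as it
--
-- def combinatorial_query(input_dict):
--     """Given the input dict, generate all combinations of the elements as search queries"""
--     # get the keys of the dict
--     fields_list = input_dict.keys()
--     # get the cartesian product of the values
--     combinations = it.product(*input_dict.values())
--     # allocate the output list
--     search_queries = []
--     # for all the combinations
--     for combination in combinations:
--         # assemble the actual search query
--         search_queries.append(','.join([field + ':' + term for field, term
--                                         in zip(fields_list, combination)]))
--     return search_queries
-- ===== SOURCE B (Python) =====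
-- def combinatorial_query(input_dict):
--     """Given the input dict, generate all combinations of the elements as search queries"""
--     # start with a single empty partial query; extend it key by key
--     result = ['']
--     for key, values in input_dict.items():
--         result = [p + (',' if p else '') + key + ':' + term
--                   for p in result for term in values]
--     return result
-- ===== Notes on version B (the rewrite author's own statement) =====
-- stated objective: alternative
-- what changed: Replaces itertools.product plus per-combination zip/join with a single incremental fold over the dict items that extends every partial query string with each value of the current key.
import Mathlib
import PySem

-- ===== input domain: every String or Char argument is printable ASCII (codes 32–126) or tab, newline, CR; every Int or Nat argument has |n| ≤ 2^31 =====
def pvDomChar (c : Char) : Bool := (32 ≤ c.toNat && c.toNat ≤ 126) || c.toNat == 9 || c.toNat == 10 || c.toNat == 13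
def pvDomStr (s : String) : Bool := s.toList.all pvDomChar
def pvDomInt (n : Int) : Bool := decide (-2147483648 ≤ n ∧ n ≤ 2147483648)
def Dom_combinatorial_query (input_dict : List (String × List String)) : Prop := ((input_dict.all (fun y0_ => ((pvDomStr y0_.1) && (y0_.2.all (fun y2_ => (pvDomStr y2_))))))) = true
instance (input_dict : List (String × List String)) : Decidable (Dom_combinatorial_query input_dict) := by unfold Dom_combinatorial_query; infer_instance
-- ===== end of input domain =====

-- B replaces itertools.product + per-combination join by one fold over the items that
-- extends every partial query string with each value of the current key (alternative decomposition).

-- ===== PORT A =====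
-- it.product(*values): cartesian product of the value lists, in order
def pvProduct : List (List String) → List (List String)
  | [] => [[]]
  | vs :: rest => vs.flatMap (fun v => (pvProduct rest).map (fun c => v :: c))

def combinatorial_query (input_dict : List (String × List String)) : List String :=
  let fields_list := input_dict.map Prod.fst
  let combinations := pvProduct (input_dict.map Prod.snd)
  -- the append loop over combinations, each query ','.join of field + ':' + term over zip
  combinations.map (fun combination =>
    PySem.Str.join "," ((fields_list.zip combination).map (fun ft => ft.1 ++ ":" ++ ft.2)))

-- ===== PORT B =====
def combinatorial_query_alt (input_dict : List (String × List String)) : List String :=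
  input_dict.foldl (fun result kv =>
    result.flatMap (fun p => kv.2.map (fun term =>
      p ++ (if p = "" then "" else ",") ++ kv.1 ++ ":" ++ term))) [""]

-- ===== PRECONDITION & SPEC =====
def Spec_combinatorial_query (input_dict : List (String × List String)) (out : List String) : Prop := out = combinatorial_query_alt input_dict
instance (input_dict : List (String × List String)) (out : List String) : Decidable (Spec_combinatorial_query input_dict out) := by unfold Spec_combinatorial_query; infer_instance

-- ===== CLAIM (what is proved, stated in full; the proofs are below) =====
def Claim_equal_combinatorial_query : Prop := ∀ (input_dict : List (String × List String)), Dom_combinatorial_query input_dict → Spec_combinatorial_query input_dict (combinatorial_query input_dict)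

-- ===== LEMMAS AND PROOFS =====

-- glue p s = p + ',' + s, with '' as a two-sided identity (what ','.join does between fields)
def pvGlue (p s : String) : String :=
  p ++ (if p = "" then "" else if s = "" then "" else ",") ++ s

theorem pvGlue_empty_left (s : String) : pvGlue "" s = s := by
  simp [pvGlue]

theorem pvGlue_empty_right (p : String) : pvGlue p "" = p := by
  simp [pvGlue]

theorem pvAppend_ne_empty_right (a b : String) (hb : b ≠ "") : a ++ b ≠ "" := by
  intro h
  have := congrArg String.toList h
  simp [String.toList_append] at this
  exact hb (by cases this with
    | intro h1 h2 => exact String.toList_injective (by simp [h2]))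

theorem pvColon_ne_empty (k t : String) : (k ++ ":" ++ t) ≠ "" := by
  intro h
  have := congrArg String.toList h
  simp at this

theorem pvGlue_assoc (p x s : String) : pvGlue (pvGlue p x) s = pvGlue p (pvGlue x s) := by
  by_cases hp : p = ""
  · rw [hp, pvGlue_empty_left, pvGlue_empty_left]
  · by_cases hx : x = ""
    · rw [hx, pvGlue_empty_right, pvGlue_empty_left]
    · by_cases hs : s = ""
      · rw [hs, pvGlue_empty_right, pvGlue_empty_right]
      · have h1 : pvGlue p x = p ++ "," ++ x := by simp [pvGlue, hp, hx]
        have h2 : pvGlue x s = x ++ "," ++ s := by simp [pvGlue, hx, hs]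
        rw [h1, h2]
        simp [pvGlue, hp, hs, String.append_assoc]

theorem pvJoin_nil : PySem.Str.join "," [] = "" := by
  simp [PySem.Str.join]

theorem pvJoin_singleton (a : String) : PySem.Str.join "," [a] = a := by
  simp [PySem.Str.join]

theorem pvJoin_cons_cons (a b : String) (rest : List String) :
    PySem.Str.join "," (a :: b :: rest) = a ++ "," ++ PySem.Str.join "," (b :: rest) := by
  simp [PySem.Str.join, PySem.Chars.join_cons_cons]
  apply String.toList_injective
  simp [String.toList_append]

-- joins of nonempty zip-lists are nonempty strings (each field contains ':')
theorem pvJoin_ne_empty (y : String × String) (ys : List (String × String)) :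
    PySem.Str.join "," ((y :: ys).map (fun ft => ft.1 ++ ":" ++ ft.2)) ≠ "" := by
  cases ys with
  | nil => rw [List.map_cons, List.map_nil, pvJoin_singleton]; exact pvColon_ne_empty y.1 y.2
  | cons z zs =>
      rw [List.map_cons, List.map_cons, pvJoin_cons_cons]
      exact pvAppend_ne_empty_right _ _ (pvJoin_ne_empty z zs)

-- ','.join over a cons zip-list equals gluing the head field onto the joined tail
theorem pvJoin_glue (k t : String) (L : List (String × String)) :
    PySem.Str.join "," (((k, t) :: L).map (fun ft => ft.1 ++ ":" ++ ft.2)) =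
      pvGlue (k ++ ":" ++ t) (PySem.Str.join "," (L.map (fun ft => ft.1 ++ ":" ++ ft.2))) := by
  cases L with
  | nil => simp [pvJoin_singleton, pvJoin_nil, pvGlue_empty_right]
  | cons z zs =>
      have hne := pvJoin_ne_empty z zs
      simp only [List.map_cons] at hne ⊢
      rw [pvJoin_cons_cons]
      simp [pvGlue, hne]

-- A's per-dict result, unfolded one item
theorem pvA_cons (k : String) (vs : List String) (rest : List (String × List String)) :
    combinatorial_query ((k, vs) :: rest) =
      vs.flatMap (fun t => (combinatorial_query rest).map (fun s => pvGlue (k ++ ":" ++ t) s)) := by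
  unfold combinatorial_query
  simp only [List.map_cons, pvProduct, List.map_flatMap, List.map_map]
  apply List.flatMap_congr
  intro t _
  apply List.map_congr_left
  intro c _
  have := pvJoin_glue k t ((rest.map Prod.fst).zip c)
  simp at this
  simp [this]

-- B's step extends a partial string p by gluing on the new field
theorem pvStep_eq_glue (p k t : String) :
    p ++ (if p = "" then "" else ",") ++ k ++ ":" ++ t = pvGlue p (k ++ ":" ++ t) := by
  simp [pvGlue, String.append_assoc]

-- loop invariant: folding B over d maps every accumulated partial p through A's results
theorem pvFold_eq (d : List (String × List String)) (acc : List String) :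
    d.foldl (fun result kv =>
        result.flatMap (fun p => kv.2.map (fun term =>
          p ++ (if p = "" then "" else ",") ++ kv.1 ++ ":" ++ term))) acc =
      acc.flatMap (fun p => (combinatorial_query d).map (fun s => pvGlue p s)) := by
  induction d generalizing acc with
  | nil =>
      simp [combinatorial_query, pvProduct, PySem.Str.join, pvGlue_empty_right]
  | cons kv rest ih =>
      obtain ⟨k, vs⟩ := kv
      rw [List.foldl_cons, ih, pvA_cons]
      simp only [List.flatMap_assoc, List.map_flatMap, List.flatMap_map, List.map_map]
      apply List.flatMap_congr
      intro p _
      apply List.flatMap_congr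
      intro t _
      apply List.map_congr_left
      intro s _
      simp only [Function.comp]
      rw [pvStep_eq_glue, pvGlue_assoc]

-- ===== VERDICT (by name: the statement is the Claim_ definition above) =====
theorem combinatorial_query_spec : Claim_equal_combinatorial_query := by
  intro input_dict _
  unfold Spec_combinatorial_query combinatorial_query_alt
  rw [pvFold_eq]
  simp [pvGlue_empty_left]
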